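-- pv_equiv track=rewrite | github.com/junhypark/Tomato | prac.py | get_best_scene_order
-- ===== SOURCE A (Python) =====
-- def get_best_scene_order(detailed_results):
--     scene_list = [result[2] for result in detailed_results]
--     consecutive_scenes = []
--     current_scene = None
--     count = 0
--
--     for i in range(len(scene_list) - 1):
--         if scene_list[i] == scene_list[i + 1]:
--             if scene_list[i] != current_scene:
--                 current_scene = scene_list[i]
--                 count = 2
--             else:
--                 count += 1
--         else:
--             if count >= 2:
--                 consecutive_scenes.append(current_scene)
--             current_scene = None
--             count = 0
--
--     if count >= 2:
--         consecutive_scenes.append(current_scene)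
--
--     return consecutive_scenes
-- ===== SOURCE B (Python) =====
-- def get_best_scene_order(detailed_results):
--     scenes = [result[2] for result in detailed_results]
--     n = len(scenes)
--     return [x for i, x in enumerate(scenes)
--             if i + 1 < n and scenes[i + 1] == x and (i == 0 or scenes[i - 1] != x)]
-- ===== Notes on version B (the rewrite author's own statement) =====
-- stated objective: alternative
-- what changed: Instead of A's current_scene/count state machine that counts run lengths and emits at run ends, B is a single comprehension keeping x at each position whose 3-element window marks the start of a run of length >= 2 (next element equal, previous element absent or different); no run length is ever counted.
import Mathlib
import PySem

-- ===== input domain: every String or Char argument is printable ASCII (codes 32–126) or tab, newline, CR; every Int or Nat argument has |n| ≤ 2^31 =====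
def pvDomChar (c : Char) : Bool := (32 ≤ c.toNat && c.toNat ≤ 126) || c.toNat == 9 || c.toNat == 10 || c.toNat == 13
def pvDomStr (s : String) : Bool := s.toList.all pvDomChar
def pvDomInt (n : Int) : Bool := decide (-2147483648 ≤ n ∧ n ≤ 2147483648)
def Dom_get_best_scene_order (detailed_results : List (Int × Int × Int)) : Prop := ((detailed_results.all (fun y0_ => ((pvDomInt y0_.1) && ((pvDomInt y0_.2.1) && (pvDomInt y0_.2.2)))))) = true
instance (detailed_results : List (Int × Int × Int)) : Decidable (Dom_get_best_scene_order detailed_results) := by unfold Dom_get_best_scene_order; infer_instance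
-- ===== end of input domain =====

-- B drops A's current_scene/count state machine: one comprehension keeps x at
-- each position whose 3-element window marks the START of a run of length >= 2
-- (next element equal, previous element absent or different); no run length is
-- ever counted (alternative decomposition; same O(n) cost). Return-value
-- equivalence is proved for all inputs.

-- ===== PORT A =====
-- state = (consecutive_scenes, current_scene, count); scene_list[i] via pyGetD
-- (exact: every index used by the loop is in range, so the default is never read)
def get_best_scene_order (detailed_results : List (Int × Int × Int)) : List Int :=
  let scene_list : List Int := detailed_results.map (fun result => result.2.2)
  let st :=
    (PySem.List.pyRange 0 ((scene_list.length : Int) - 1) 1).foldl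
      (fun (s : List Int × Option Int × Int) i =>
        let si := PySem.List.pyGetD scene_list i 0
        let si1 := PySem.List.pyGetD scene_list (i + 1) 0
        if si = si1 then
          if some si ≠ s.2.1 then (s.1, some si, 2)
          else (s.1, s.2.1, s.2.2 + 1)
        else
          if s.2.2 ≥ 2 then (s.1 ++ [s.2.1.getD 0], none, 0)
          else (s.1, none, 0))
      ([], none, 0)
  if st.2.2 ≥ 2 then st.1 ++ [st.2.1.getD 0] else st.1

-- ===== PORT B =====
-- the comprehension over enumerate(scenes): keep x where i+1 < n and
-- scenes[i+1] == x and (i == 0 or scenes[i-1] != x).  Python's `or`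
-- short-circuits, so scenes[i-1] is only read for i >= 1; the port's pyGetD at
-- i-1 is evaluated but its value is irrelevant when the first disjunct holds.
def get_best_scene_order_alt (detailed_results : List (Int × Int × Int)) : List Int :=
  let scenes : List Int := detailed_results.map (fun result => result.2.2)
  let n : Int := scenes.length
  (PySem.List.enumerate scenes).filterMap (fun p =>
    if p.1 + 1 < n ∧ PySem.List.pyGetD scenes (p.1 + 1) 0 = p.2 ∧
       (p.1 = 0 ∨ PySem.List.pyGetD scenes (p.1 - 1) 0 ≠ p.2)
    then some p.2 else none)

-- ===== PRECONDITION & SPEC =====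
def Spec_get_best_scene_order (detailed_results : List (Int × Int × Int)) (out : List Int) : Prop := out = get_best_scene_order_alt detailed_results
instance (detailed_results : List (Int × Int × Int)) (out : List Int) : Decidable (Spec_get_best_scene_order detailed_results out) := by unfold Spec_get_best_scene_order; infer_instance

-- ===== CLAIM (what is proved, stated in full; the proofs are below) =====
def Claim_equal_get_best_scene_order : Prop := ∀ (detailed_results : List (Int × Int × Int)), Dom_get_best_scene_order detailed_results → Spec_get_best_scene_order detailed_results (get_best_scene_order detailed_results)

-- ===== LEMMAS AND PROOFS =====

-- common spec: the keys of the maximal runs of length >= 2, in order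
def pvRuns_go (k : Int) (c : Int) : List Int → List (Int × Int)
  | [] => [(k, c)]
  | y :: ys => if y = k then pvRuns_go k (c + 1) ys else (k, c) :: pvRuns_go y 1 ys

def pvRuns : List Int → List (Int × Int)
  | [] => []
  | x :: xs => pvRuns_go x 1 xs

def pvFilt (rs : List (Int × Int)) : List Int :=
  rs.filterMap (fun p => if p.2 ≥ 2 then some p.1 else none)

-- ===== A-side: state machine = pvFilt ∘ pvRuns =====

-- the list of adjacent pairs of xs
def pvPairs : List Int → List (Int × Int)
  | x :: y :: ys => (x, y) :: pvPairs (y :: ys)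
  | _ => []

-- A's loop body, on an adjacent pair
def pvStep (s : List Int × Option Int × Int) (p : Int × Int) : List Int × Option Int × Int :=
  if p.1 = p.2 then
    if some p.1 ≠ s.2.1 then (s.1, some p.1, 2)
    else (s.1, s.2.1, s.2.2 + 1)
  else
    if s.2.2 ≥ 2 then (s.1 ++ [s.2.1.getD 0], none, 0)
    else (s.1, none, 0)

def pvFin (s : List Int × Option Int × Int) : List Int :=
  if s.2.2 ≥ 2 then s.1 ++ [s.2.1.getD 0] else s.1

-- the indexed pairs the loop reads are exactly the adjacent pairs
theorem pvPairs_idx (xs : List Int) :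
    (List.range (xs.length - 1)).map (fun i => (xs.getD i 0, xs.getD (i + 1) 0)) = pvPairs xs := by
  induction xs with
  | nil => simp [pvPairs]
  | cons x xs ih =>
    cases xs with
    | nil => simp [pvPairs]
    | cons y ys =>
      have h : (x :: y :: ys).length - 1 = ((y :: ys).length - 1) + 1 := by
        simp [List.length_cons]
      rw [h, List.range_succ_eq_map, List.map_cons, List.map_map]
      simp only [pvPairs, List.cons.injEq]
      refine ⟨by simp, ?_⟩
      rw [← ih]
      apply List.map_congr_left
      intro i _
      simp

theorem pvRange_pairs (xs : List Int) :
    (PySem.List.pyRange 0 ((xs.length : Int) - 1) 1).map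
      (fun i => (PySem.List.pyGetD xs i 0, PySem.List.pyGetD xs (i + 1) 0)) = pvPairs xs := by
  rw [PySem.List.pyRange_one, List.map_map, ← pvPairs_idx xs]
  have hlen : (((xs.length : Int) - 1 - 0).toNat) = xs.length - 1 := by omega
  rw [hlen]
  apply List.map_congr_left
  intro i _
  have h1 : (0 : Int) + (i : Int) = ((i : Nat) : Int) := by omega
  have h2 : (i : Int) + 1 = (((i + 1 : Nat)) : Int) := by push_cast; omega
  simp only [Function.comp, h1, PySem.List.pyGetD_natCast]
  rw [h2, PySem.List.pyGetD_natCast]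

-- main invariant: the state machine over the remaining pairs, finalized, appends
-- exactly the filtered runs of the remaining list.  Two entry points:
-- (a) mid-run state (some x, c) with c ≥ 2; (b) fresh state (none, 0).
theorem pvInv (xs : List Int) :
    (∀ x acc c, 2 ≤ c →
      pvFin ((pvPairs (x :: xs)).foldl pvStep (acc, some x, c)) = acc ++ pvFilt (pvRuns_go x c xs)) ∧
    (∀ x acc,
      pvFin ((pvPairs (x :: xs)).foldl pvStep (acc, none, 0)) = acc ++ pvFilt (pvRuns_go x 1 xs)) := by
  induction xs with
  | nil =>
    constructor
    · intro x acc c hc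
      simp [pvPairs, pvFin, pvFilt, pvRuns_go, hc]
    · intro x acc
      simp [pvPairs, pvFin, pvFilt, pvRuns_go]
  | cons y ys ih =>
    constructor
    · intro x acc c hc
      by_cases hxy : x = y
      · subst hxy
        have hstep : pvStep (acc, some x, c) (x, x) = (acc, some x, c + 1) := by
          simp [pvStep]
        simp only [pvPairs, List.foldl_cons, hstep]
        rw [ih.1 x acc (c + 1) (by omega)]
        simp [pvRuns_go]
      · have hyx : ¬ y = x := fun h => hxy h.symm
        have hstep : pvStep (acc, some x, c) (x, y) = (acc ++ [x], none, 0) := by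
          simp [pvStep, hxy, hc]
        simp only [pvPairs, List.foldl_cons, hstep]
        rw [ih.2 y (acc ++ [x])]
        simp only [pvRuns_go, hyx, pvFilt]
        simp [hc]
    · intro x acc
      by_cases hxy : x = y
      · subst hxy
        have hstep : pvStep (acc, none, 0) (x, x) = (acc, some x, 2) := by
          simp [pvStep]
        simp only [pvPairs, List.foldl_cons, hstep]
        rw [ih.1 x acc 2 (by omega)]
        simp [pvRuns_go]
      · have hyx : ¬ y = x := fun h => hxy h.symm
        have hstep : pvStep (acc, none, 0) (x, y) = (acc, none, 0) := by
          simp [pvStep, hxy]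
        simp only [pvPairs, List.foldl_cons, hstep]
        rw [ih.2 y acc]
        simp only [pvRuns_go, if_neg hyx, pvFilt, List.filterMap_cons]
        norm_num

theorem pvMachine_eq (xs : List Int) :
    pvFin ((pvPairs xs).foldl pvStep ([], none, 0)) = pvFilt (pvRuns xs) := by
  cases xs with
  | nil => simp [pvPairs, pvRuns, pvFin, pvFilt]
  | cons x xs =>
    have := (pvInv xs).2 x []
    simpa [pvRuns] using this

-- ===== B-side: run-start stencil = pvFilt ∘ pvRuns =====

-- the (previous?, current, next) window at each adjacent-pair position
def pvTri (prev : Option Int) : List Int → List (Option Int × Int × Int)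
  | x :: y :: ys => (prev, x, y) :: pvTri (some x) (y :: ys)
  | _ => []

-- B's element filter, on a window
def pvKeep (t : Option Int × Int × Int) : Option Int :=
  if t.2.1 = t.2.2 ∧ t.1 ≠ some t.2.1 then some t.2.1 else none

-- the stencil over windows computes the filtered runs
theorem pvTriInv (xs : List Int) :
    (∀ x c, 2 ≤ c →
      x :: (pvTri (some x) (x :: xs)).filterMap pvKeep = pvFilt (pvRuns_go x c xs)) ∧
    (∀ x prev, prev ≠ some x →
      (pvTri prev (x :: xs)).filterMap pvKeep = pvFilt (pvRuns_go x 1 xs)) := by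
  induction xs with
  | nil =>
    constructor
    · intro x c hc; simp [pvTri, pvRuns_go, pvFilt, hc]
    · intro x prev _; simp [pvTri, pvRuns_go, pvFilt]
  | cons y ys ih =>
    constructor
    · intro x c hc
      by_cases hxy : x = y
      · subst hxy
        simp only [pvTri, List.filterMap_cons]
        have hk : pvKeep (some x, x, x) = none := by simp [pvKeep]
        rw [hk, ih.1 x (c + 1) (by omega)]
        simp [pvRuns_go]
      · have hyx : ¬ y = x := fun h => hxy h.symm
        simp only [pvTri, List.filterMap_cons]
        have hk : pvKeep (some x, x, y) = none := by simp [pvKeep, hxy]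
        rw [hk, ih.2 y (some x) (by simpa using hxy)]
        simp [pvRuns_go, hyx, pvFilt, hc]
    · intro x prev hprev
      by_cases hxy : x = y
      · subst hxy
        simp only [pvTri, List.filterMap_cons]
        have hk : pvKeep (prev, x, x) = some x := by simp [pvKeep, hprev]
        simp only [hk]
        rw [ih.1 x 2 (by omega)]
        simp [pvRuns_go]
      · have hyx : ¬ y = x := fun h => hxy h.symm
        simp only [pvTri, List.filterMap_cons]
        have hk : pvKeep (prev, x, y) = none := by simp [pvKeep, hxy]
        rw [hk, ih.2 y (some x) (by simpa using hxy)]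
        simp [pvRuns_go, hyx, pvFilt]

theorem pvStencil_eq (xs : List Int) :
    (pvTri none xs).filterMap pvKeep = pvFilt (pvRuns xs) := by
  cases xs with
  | nil => simp [pvTri, pvRuns, pvFilt]
  | cons x xs => exact (pvTriInv xs).2 x none (by simp)

-- the indexed windows B reads are exactly the pvTri windows
theorem pvTri_idx (xs : List Int) (prev : Option Int) :
    (List.range (xs.length - 1)).map
      (fun i => ((if i = 0 then prev else some (xs.getD (i - 1) 0)), xs.getD i 0, xs.getD (i + 1) 0))
      = pvTri prev xs := by
  induction xs generalizing prev with
  | nil => simp [pvTri]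
  | cons x xs ih =>
    cases xs with
    | nil => simp [pvTri]
    | cons y ys =>
      have h : (x :: y :: ys).length - 1 = ((y :: ys).length - 1) + 1 := by
        simp [List.length_cons]
      rw [h, List.range_succ_eq_map, List.map_cons, List.map_map]
      simp only [pvTri, List.cons.injEq]
      refine ⟨by simp, ?_⟩
      rw [← ih (some x)]
      apply List.map_congr_left
      intro i _
      cases i with
      | zero => simp
      | succ j => simp

-- B's port, rewritten over List.range
theorem pvAlt_range (xs : List Int) :
    (PySem.List.enumerate xs).filterMap (fun p =>
      if p.1 + 1 < (xs.length : Int) ∧ PySem.List.pyGetD xs (p.1 + 1) 0 = p.2 ∧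
         (p.1 = 0 ∨ PySem.List.pyGetD xs (p.1 - 1) 0 ≠ p.2)
      then some p.2 else none)
      = (pvTri none xs).filterMap pvKeep := by
  rw [PySem.List.enumerate_eq_map_pyRange (d := 0), List.filterMap_map,
      PySem.List.pyRange_one, List.filterMap_map, ← pvTri_idx xs none, List.filterMap_map]
  have hto : ((PySem.List.len xs - 0).toNat) = xs.length := by
    simp [PySem.List.len]
  rw [hto]
  rcases Nat.eq_zero_or_pos xs.length with h0 | hpos
  · simp [h0]
  · have hsp : xs.length = (xs.length - 1) + 1 := by omega
    have hsplit : List.range xs.length = List.range (xs.length - 1) ++ [xs.length - 1] := by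
      conv_lhs => rw [hsp]
      rw [List.range_succ]
    rw [hsplit, List.filterMap_append]
    have hfalse : ¬ ((0 : Int) + ((xs.length - 1 : Nat) : Int) + 1 < (xs.length : Int)) := by
      omega
    simp only [Function.comp, List.filterMap_cons, List.filterMap_nil, hfalse, false_and,
      if_false, List.append_nil]
    apply List.filterMap_congr
    intro i hi
    simp only [List.mem_range] at hi
    have e0 : (0 : Int) + (i : Int) = ((i : Nat) : Int) := by omega
    have e1 : ((i : Nat) : Int) + 1 = (((i + 1 : Nat)) : Int) := by push_cast; ring
    have hlt : (((i + 1 : Nat)) : Int) < (xs.length : Int) := by push_cast; omega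
    simp only [e0, PySem.List.pyGetD_natCast, e1]
    by_cases hi0 : i = 0
    · subst hi0
      have hn2 : 1 < xs.length := by omega
      have hl2 : (1 : Int) < (xs.length : Int) := by omega
      simp [pvKeep, eq_comm, hn2, hl2]
    · have e2 : ((i : Nat) : Int) - 1 = (((i - 1 : Nat)) : Int) := by omega
      have hne : ((i : Nat) : Int) ≠ 0 := by
        simpa using fun h => hi0 (by exact_mod_cast h)
      rw [e2, PySem.List.pyGetD_natCast]
      simp only [pvKeep, hi0, if_false, hlt, true_and, hne, false_or, ne_eq,
        Option.some.injEq]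
      rcases eq_or_ne (xs[i + 1]?.getD 0) (xs[i]?.getD 0) with he | he
      · simp [he]
      · simp [he, he.symm]

-- ===== VERDICT (by name: the statement is the Claim_ definition above) =====
theorem get_best_scene_order_spec : Claim_equal_get_best_scene_order := by
  intro dr _
  unfold Spec_get_best_scene_order get_best_scene_order get_best_scene_order_alt
  set xs : List Int := dr.map (fun r => r.2.2) with hxs
  have hfold : (PySem.List.pyRange 0 ((xs.length : Int) - 1) 1).foldl
      (fun (s : List Int × Option Int × Int) i =>
        let si := PySem.List.pyGetD xs i 0
        let si1 := PySem.List.pyGetD xs (i + 1) 0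
        if si = si1 then
          if some si ≠ s.2.1 then (s.1, some si, 2)
          else (s.1, s.2.1, s.2.2 + 1)
        else
          if s.2.2 ≥ 2 then (s.1 ++ [s.2.1.getD 0], none, 0)
          else (s.1, none, 0)) ([], none, 0)
      = (pvPairs xs).foldl pvStep ([], none, 0) := by
    rw [← pvRange_pairs xs, List.foldl_map]
    rfl
  simp only [hfold]
  rw [pvAlt_range xs, pvStencil_eq xs, ← pvMachine_eq xs]
  rfl
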